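-- pv_equiv track=rewrite | github.com/Iltsd/AOIS | LAB3/Code/logic.py | can_merge
-- ===== SOURCE A (Python) =====
-- def can_merge(t1, t2):
--     differ_count = 0
--     for j in range(len(t1)):
--         if t1[j] == t2[j]:
--             continue
--         elif (t1[j], t2[j]) in [('0', '1'), ('1', '0')]:
--             differ_count += 1
--         else:
--             return False
--     return differ_count == 1
-- ===== SOURCE B (Python) =====
-- def can_merge(t1, t2):
--     n = len(t1)
--     return any(
--         t1[j] in '01' and t2[:n] == t1[:j] + ('1' if t1[j] == '0' else '0') + t1[j + 1:]
--         for j in range(n)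
--     )
-- ===== Notes on version B (the rewrite author's own statement) =====
-- stated objective: alternative
-- what changed: Instead of scanning for mismatches at all, B generates each one-bit-flip neighbour of t1 (flip position j) and tests whether t2's prefix equals that neighbour string, trading A's O(n) counting pass for an O(n^2) generate-and-compare search.
import Mathlib
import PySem

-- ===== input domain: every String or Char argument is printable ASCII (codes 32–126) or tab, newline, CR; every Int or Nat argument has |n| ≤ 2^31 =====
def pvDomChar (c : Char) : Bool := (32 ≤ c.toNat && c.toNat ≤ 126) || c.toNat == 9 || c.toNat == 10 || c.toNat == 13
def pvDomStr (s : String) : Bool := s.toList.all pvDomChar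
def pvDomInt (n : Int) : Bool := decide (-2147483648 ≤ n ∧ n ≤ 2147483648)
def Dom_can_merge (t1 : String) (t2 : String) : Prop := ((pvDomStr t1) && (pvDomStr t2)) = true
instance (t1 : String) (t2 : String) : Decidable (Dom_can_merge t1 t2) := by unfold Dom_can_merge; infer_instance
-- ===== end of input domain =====

-- B replaces A's mismatch-counting scan by a different algorithm: generate each one-bit-flip
-- neighbour of t1 and test whether t2's prefix equals it (alternative; O(n^2) vs A's O(n)).

-- ===== PORT A =====
-- the index loop over range(len(t1)) walks both strings in step; the [] case for t2 is where
-- Python raises IndexError (excluded by Pre_can_merge)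
def canMergeGoA : List Char → List Char → Int → Bool
  | [], _, c => c == 1
  | _ :: _, [], _ => false
  | a :: r1, b :: r2, c =>
    if a == b then canMergeGoA r1 r2 c
    else if [('0', '1'), ('1', '0')].contains (a, b) then canMergeGoA r1 r2 (c + 1)
    else false

def can_merge (t1 : String) (t2 : String) : Bool :=
  canMergeGoA t1.toList t2.toList 0

-- ===== PORT B =====
-- the generator's body for index j: t1[j] in '01' and
-- t2[:n] == t1[:j] + ('1' if t1[j] == '0' else '0') + t1[j+1:]
-- (slices with nonnegative bounds are take/drop: PySem.List.slice_to_natCast / slice_from_natCast)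
def pvBBody (l1 l2 : List Char) (j : Nat) : Bool :=
  let c := l1.getD j ' '
  ['0', '1'].contains c &&
    (l2.take l1.length == l1.take j ++ [if c == '0' then '1' else '0'] ++ l1.drop (j + 1))

-- any(... for j in range(n))
def pvB (l1 l2 : List Char) : Bool := (List.range l1.length).any (pvBBody l1 l2)

def can_merge_alt (t1 : String) (t2 : String) : Bool :=
  pvB t1.toList t2.toList

-- ===== PRECONDITION & SPEC =====
-- Pre_ excludes exactly the inputs on which A raises IndexError: t2 shorter than t1 with no
-- non-binary mismatch before t2's end (on a non-binary mismatch A returns False early).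
def Pre_can_merge (t1 : String) (t2 : String) : Prop :=
  t1.toList.length ≤ t2.toList.length ∨
    ∃ j < t2.toList.length, t1.toList.getD j ' ' ≠ t2.toList.getD j ' ' ∧
      (t1.toList.getD j ' ', t2.toList.getD j ' ') ∉ [('0', '1'), ('1', '0')]
instance (t1 : String) (t2 : String) : Decidable (Pre_can_merge t1 t2) := by
  unfold Pre_can_merge; infer_instance

def pvWitness_can_merge : String × String := ("1010", "1000")

def Spec_can_merge (t1 : String) (t2 : String) (out : Bool) : Prop := out = can_merge_alt t1 t2
instance (t1 : String) (t2 : String) (out : Bool) : Decidable (Spec_can_merge t1 t2 out) := by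
  unfold Spec_can_merge; infer_instance

-- ===== CLAIM (what is proved, stated in full; the proofs are below) =====
def Claim_equal_can_merge : Prop := ∀ (t1 : String) (t2 : String), Dom_can_merge t1 t2 → Pre_can_merge t1 t2 → Spec_can_merge t1 t2 (can_merge t1 t2)

-- ===== LEMMAS AND PROOFS =====

-- the list of mismatching character pairs, walking both lists in step
def pvMism : List Char → List Char → List (Char × Char)
  | [], _ => []
  | _ :: _, [] => []
  | a :: r1, b :: r2 =>
    if a == b then pvMism r1 r2 else (a, b) :: pvMism r1 r2

def pvValid (p : Char × Char) : Bool := [('0', '1'), ('1', '0')].contains p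

theorem pvGoA_eq (l1 : List Char) : ∀ (l2 : List Char) (c : Int),
    l1.length ≤ l2.length →
    canMergeGoA l1 l2 c =
      (if (pvMism l1 l2).all pvValid then (c + ((pvMism l1 l2).length : Int)) == 1 else false) := by
  induction l1 with
  | nil =>
    intro l2 c _
    simp [canMergeGoA, pvMism]
  | cons a r1 ih =>
    intro l2 c h
    cases l2 with
    | nil => simp at h
    | cons b r2 =>
      simp only [List.length_cons, Nat.add_le_add_iff_right] at h
      cases hab : (a == b) with
      | true => simp [canMergeGoA, pvMism, hab, ih r2 c h]
      | false =>
        cases hv : [('0', '1'), ('1', '0')].contains (a, b) with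
        | true =>
          simp only [canMergeGoA, pvMism, hab, hv, Bool.false_eq_true, if_false, if_true,
            ih r2 (c + 1) h, List.all_cons, List.length_cons]
          rw [show pvValid (a, b) = true from hv]
          simp only [Bool.true_and]
          split
          · congr 1
            push_cast
            ring
          · rfl
        | false =>
          simp only [canMergeGoA, pvMism, hab, hv, Bool.false_eq_true, if_false, List.all_cons]
          rw [show pvValid (a, b) = false from hv]
          simp

-- no mismatch ↔ t2's prefix of t1's length is t1
theorem pvMism_nil_iff (l1 : List Char) : ∀ (l2 : List Char),
    l1.length ≤ l2.length → (pvMism l1 l2 = [] ↔ l2.take l1.length = l1) := by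
  induction l1 with
  | nil => intro l2 _; simp [pvMism]
  | cons a r1 ih =>
    intro l2 h
    cases l2 with
    | nil => simp at h
    | cons b r2 =>
      simp only [List.length_cons, Nat.add_le_add_iff_right] at h
      cases hab : (a == b) with
      | true =>
        have hb : a = b := eq_of_beq hab
        simp [pvMism, List.take_succ_cons, ih r2 h, hb.symm]
      | false =>
        have hb : b ≠ a := fun hh => by simp [hh] at hab
        simp [pvMism, hab, List.take_succ_cons, hb]

-- the body at one index equals A's pair test, for the head characters
theorem pvChar (a b : Char) :
    (['0', '1'].contains a && (b == if a == '0' then '1' else '0')) = pvValid (a, b) := by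
  by_cases h0 : a = '0'
  · subst h0; cases hb : (b == '1') <;> simp_all [pvValid]
  · by_cases h1 : a = '1'
    · subst h1; cases hb : (b == '0') <;> simp_all [pvValid]
    · simp [pvValid, h0, h1]

-- peel index 0 off B's search over range(len t1)
theorem pvB_cons (a b : Char) (r1 r2 : List Char) :
    pvB (a :: r1) (b :: r2) = (pvBBody (a :: r1) (b :: r2) 0 || (b == a && pvB r1 r2)) := by
  unfold pvB
  rw [show (a :: r1).length = r1.length + 1 from rfl, List.range_succ_eq_map]
  simp only [List.any_cons, List.any_map, Function.comp_def]
  congr 1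
  have hbody : ∀ j, pvBBody (a :: r1) (b :: r2) (j + 1) = (b == a && pvBBody r1 r2 j) := by
    intro j
    simp only [pvBBody, List.getD_cons_succ, List.length_cons, List.take_succ_cons,
      List.drop_succ_cons, List.cons_append, List.cons_beq_cons]
    cases hba : (b == a) <;> cases hc : ['0', '1'].contains (r1.getD j ' ') <;> simp
  simp only [hbody]
  cases hba : (b == a) <;> simp

theorem pvB_eq (l1 : List Char) : ∀ (l2 : List Char),
    l1.length ≤ l2.length →
    pvB l1 l2 = (match pvMism l1 l2 with
                 | [p] => pvValid p
                 | _ => false) := by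
  induction l1 with
  | nil => intro l2 _; simp [pvB, pvMism, List.range_zero]
  | cons a r1 ih =>
    intro l2 h
    cases l2 with
    | nil => simp at h
    | cons b r2 =>
      simp only [List.length_cons, Nat.add_le_add_iff_right] at h
      rw [pvB_cons, ih r2 h]
      cases hab : (a == b) with
      | true =>
        have hb : a = b := eq_of_beq hab
        subst hb
        have hba : (a == a) = true := by simp
        have h0 : pvBBody (a :: r1) (a :: r2) 0 = false := by
          simp only [pvBBody, List.getD_cons_zero, List.length_cons, List.take_zero,
            List.take_succ_cons, List.nil_append, List.cons_append, List.drop_succ_cons,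
            List.drop_zero, List.cons_beq_cons]
          by_cases h0' : a = '0'
          · subst h0'; simp
          · by_cases h1' : a = '1'
            · subst h1'; simp
            · simp [h0', h1']
        rw [h0, hba]
        simp [pvMism]
      | false =>
        have hba : (b == a) = false := by
          cases hba : (b == a)
          · rfl
          · exact absurd (eq_of_beq hba).symm (fun hh => by simp [hh] at hab)
        rw [hba]
        simp only [Bool.false_and, Bool.or_false]
        simp only [pvBBody, List.getD_cons_zero, List.length_cons, List.take_zero,
          List.take_succ_cons, List.nil_append, List.cons_append, List.drop_succ_cons,
          List.drop_zero, List.cons_beq_cons]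
        simp only [pvMism, hab, Bool.false_eq_true, if_false]
        have htail := pvMism_nil_iff r1 r2 h
        cases hm : pvMism r1 r2 with
        | nil =>
          have ht' : (r2.take r1.length == r1) = true := by simp [htail.mp hm]
          rw [ht']
          simp only [Bool.and_true]
          exact pvChar a b
        | cons q rest =>
          have ht' : (r2.take r1.length == r1) = false := by
            simp only [beq_eq_false_iff_ne, ne_eq]
            intro hh
            simp [htail.mpr hh] at hm
          rw [ht']
          simp

-- with t2 shorter, B's slice comparison fails at every index on length alone
theorem pvB_short (l1 l2 : List Char) (h : l2.length < l1.length) : pvB l1 l2 = false := by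
  rw [pvB, List.any_eq_false]
  intro j hj
  simp only [List.mem_range] at hj
  simp only [pvBBody, Bool.and_eq_true, not_and]
  intro _ hbeq
  have heq := eq_of_beq hbeq
  have := congrArg List.length heq
  simp only [List.length_take, List.length_append, List.length_cons, List.length_nil,
    List.length_drop] at this
  omega

-- with t2 shorter, a non-binary mismatch before t2's end makes A return False
theorem pvGoA_short (l1 : List Char) : ∀ (l2 : List Char) (c : Int),
    l2.length < l1.length →
    (∃ j < l2.length, l1.getD j ' ' ≠ l2.getD j ' ' ∧
      (l1.getD j ' ', l2.getD j ' ') ∉ [('0', '1'), ('1', '0')]) →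
    canMergeGoA l1 l2 c = false := by
  induction l1 with
  | nil => intro l2 c h _; simp at h
  | cons a r1 ih =>
    intro l2 c h hex
    cases l2 with
    | nil => rfl
    | cons b r2 =>
      obtain ⟨j, hj, hne, hnv⟩ := hex
      cases j with
      | zero =>
        simp only [List.getD_cons_zero] at hne hnv
        have hab : (a == b) = false := by simp [hne]
        have hv : ([('0', '1'), ('1', '0')].contains (a, b)) = false := by
          cases hv : [('0', '1'), ('1', '0')].contains (a, b)
          · rfl
          · exact absurd (by simpa using hv) hnv
        simp only [canMergeGoA, hab, hv, Bool.false_eq_true, if_false]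
      | succ k =>
        simp only [List.length_cons, Nat.add_lt_add_iff_right] at hj
        simp only [List.getD_cons_succ] at hne hnv
        have h' : r2.length < r1.length := by
          simp only [List.length_cons, Nat.add_lt_add_iff_right] at h; exact h
        have hrec := ih r2 (c + 1) h' ⟨k, hj, hne, hnv⟩
        have hrec' := ih r2 c h' ⟨k, hj, hne, hnv⟩
        unfold canMergeGoA
        split_ifs
        · exact hrec'
        · exact hrec
        · rfl

-- ===== VERDICT (by name: the statement is the Claim_ definition above) =====
theorem can_merge_spec : Claim_equal_can_merge := by
  intro t1 t2 _ hpre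
  unfold Spec_can_merge
  unfold Pre_can_merge at hpre
  unfold can_merge can_merge_alt
  by_cases hlen : t1.toList.length ≤ t2.toList.length
  case neg =>
    have hlt : t2.toList.length < t1.toList.length := by omega
    rcases hpre with hpre | hex
    · omega
    · rw [pvB_short _ _ hlt, pvGoA_short _ _ 0 hlt hex]
  rw [pvGoA_eq t1.toList t2.toList 0 hlen, pvB_eq t1.toList t2.toList hlen]
  cases hm : pvMism t1.toList t2.toList with
  | nil => simp
  | cons p rest =>
    cases rest with
    | nil =>
      by_cases hv : pvValid p
      · simp [hv]
      · simp [hv, List.all_cons]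
    | cons q rest2 =>
      split
      · simp
        omega
      · rfl
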